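-- pv_equiv track=rewrite | github.com/ddkasa/ulauncher-toggl-extension | ulauncher_toggl_extension/toggl/cli/meta.py | count_table
-- ===== SOURCE A (Python) =====
-- def count_table(header: str) -> list[int]:
--     RIGHT_ALIGNED = {"start", "stop", "duration"}
--
--     count = []
--     current_word = ""
--
--     for index, letter in enumerate(header):
--         right = current_word.strip().lower() in RIGHT_ALIGNED
--
--         if (
--             not right
--             and current_word
--             and current_word[-1] == " "
--             and letter != " "
--             and any(x.isalpha() for x in current_word)
--         ):
--             current_word = ""
--             count.append(index + 1)
--
--         elif right and current_word[-1] != " " and letter == " ":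
--             current_word = ""
--             count.append(index + 1)
--
--         current_word += letter
--
--     return count
-- ===== SOURCE B (Python) =====
-- def count_table(header: str) -> list[int]:
--     RIGHT_ALIGNED = {"start", "stop", "duration"}
--     out = []
--     ctx = ""  # text accumulated since the last reset
--     i = 0
--     n = len(header)
--     while i < n:
--         if header[i] == " ":
--             ctx += header[i]
--             i += 1
--             continue
--         # word starts at i: left-alignment rule on the context before it
--         if ctx and ctx.strip().lower() not in RIGHT_ALIGNED and any(c.isalpha() for c in ctx):
--             out.append(i + 1)
--             ctx = ""
--         j = i
--         while j < n and header[j] != " ":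
--             j += 1
--         ctx += header[i:j]
--         # word ends at j: right-alignment rule on context + word
--         if j < n and ctx.strip().lower() in RIGHT_ALIGNED:
--             out.append(j + 1)
--             ctx = ""
--         i = j
--     return out
-- ===== Notes on version B (the rewrite author's own statement) =====
-- stated objective: faster
-- what changed: A is a per-character state machine that re-strips/lowers and alpha-scans the whole accumulated context at every character; B tokenizes the header into space-separated words and applies the left/right alignment rules only once per word boundary.
import Mathlib
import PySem

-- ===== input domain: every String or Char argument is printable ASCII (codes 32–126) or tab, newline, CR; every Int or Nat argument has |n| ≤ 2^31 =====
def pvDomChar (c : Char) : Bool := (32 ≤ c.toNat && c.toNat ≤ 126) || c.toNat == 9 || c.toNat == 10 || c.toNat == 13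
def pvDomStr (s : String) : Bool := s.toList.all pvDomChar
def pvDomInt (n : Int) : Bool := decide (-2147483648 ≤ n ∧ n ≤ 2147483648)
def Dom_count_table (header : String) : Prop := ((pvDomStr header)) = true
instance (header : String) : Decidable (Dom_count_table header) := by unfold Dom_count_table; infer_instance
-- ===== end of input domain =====

-- B replaces A's per-character state machine (which re-scans the accumulated context at every char)
-- with a word-at-a-time scan that checks the alignment rules only at word boundaries (measured faster).

-- ===== PORT A =====
-- RIGHT_ALIGNED = {"start", "stop", "duration"}; membership of current_word.strip().lower()
def ctRightA (cw : List Char) : Bool :=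
  decide (PySem.Chars.lower (PySem.Chars.strip cw) ∈
    [['s','t','a','r','t'], ['s','t','o','p'], ['d','u','r','a','t','i','o','n']])

-- the for-loop of A: state (count, current_word), index tracked by enumerate
def ctLoopA (count : List Int) (cw : List Char) (i : Nat) (l : List Char) : List Int :=
  match l with
  | [] => count
  | letter :: rest =>
    let right := ctRightA cw
    -- current_word[-1] on the guaranteed-nonempty current_word is its last char
    if right = false ∧ cw ≠ [] ∧ cw.getLast? = some ' ' ∧ letter ≠ ' ' ∧ cw.any PySem.Chars.isalpha then
      ctLoopA (count ++ [(i : Int) + 1]) [letter] (i + 1) rest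
    else if right = true ∧ cw.getLast? ≠ some ' ' ∧ letter = ' ' then
      ctLoopA (count ++ [(i : Int) + 1]) [letter] (i + 1) rest
    else
      ctLoopA count (cw ++ [letter]) (i + 1) rest

def count_table (header : String) : List Int :=
  ctLoopA [] [] 0 header.toList

-- ===== PORT B =====
def ctRightB (ctx : List Char) : Bool :=
  decide (PySem.Chars.lower (PySem.Chars.strip ctx) ∈
    [['s','t','a','r','t'], ['s','t','o','p'], ['d','u','r','a','t','i','o','n']])

-- the inner word-consuming loop strictly shortens the list (for termination)
lemma ctDropLt (c : Char) (rest : List Char) (hc : ¬ c = ' ') :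
    ((c :: rest).dropWhile (fun x => x ≠ ' ')).length < (c :: rest).length := by
  rw [List.dropWhile_cons_of_pos (by simpa using hc)]
  have h := List.length_dropWhile_le (fun x => x ≠ ' ') rest
  simp only [List.length_cons]; omega

-- the while-loop of B: skip spaces into ctx; at a word, apply the left rule, consume
-- the word wholesale (takeWhile/dropWhile = the inner index loop), apply the right rule
def ctLoopB (ctx : List Char) (i : Nat) (l : List Char) (n : Nat) : List Int :=
  match l with
  | [] => []
  | c :: rest =>
    if hsp : c = ' ' then
      ctLoopB (ctx ++ [c]) (i + 1) rest n
    else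
      let marks1 : List Int :=
        if ctx ≠ [] ∧ ctRightB ctx = false ∧ ctx.any PySem.Chars.isalpha then [(i : Int) + 1] else []
      let ctx0 : List Char :=
        if ctx ≠ [] ∧ ctRightB ctx = false ∧ ctx.any PySem.Chars.isalpha then [] else ctx
      let w := (c :: rest).takeWhile (fun x => x ≠ ' ')
      let j := i + w.length
      if j < n ∧ ctRightB (ctx0 ++ w) = true then
        marks1 ++ ((j : Int) + 1) :: ctLoopB [] j ((c :: rest).dropWhile (fun x => x ≠ ' ')) n
      else
        marks1 ++ ctLoopB (ctx0 ++ w) j ((c :: rest).dropWhile (fun x => x ≠ ' ')) n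
  termination_by l.length
  decreasing_by
    · simp
    · exact ctDropLt c rest hsp
    · exact ctDropLt c rest hsp

def count_table_alt (header : String) : List Int :=
  ctLoopB [] 0 header.toList header.toList.length

-- ===== PRECONDITION & SPEC =====
def Spec_count_table (header : String) (out : List Int) : Prop := out = count_table_alt header
instance (header : String) (out : List Int) : Decidable (Spec_count_table header out) := by unfold Spec_count_table; infer_instance

-- ===== CLAIM (what is proved, stated in full; the proofs are below) =====
def Claim_equal_count_table : Prop := ∀ (header : String), Dom_count_table header → Spec_count_table header (count_table header)

-- ===== LEMMAS AND PROOFS =====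

-- A's loop walks through a run of non-space chars without firing either branch
lemma ctA_word (w : List Char) (hw : ∀ c ∈ w, c ≠ ' ') :
    ∀ (cw : List Char) (d : Char), d ≠ ' ' → ∀ (count : List Int) (i : Nat) (rest : List Char),
    ctLoopA count (cw ++ [d]) i (w ++ rest) = ctLoopA count (cw ++ d :: w) (i + w.length) rest := by
  induction w with
  | nil => intro cw d hd count i rest; simp
  | cons a w' ih =>
    intro cw d hd count i rest
    have ha : a ≠ ' ' := hw a (by simp)
    have hw' : ∀ c ∈ w', c ≠ ' ' := fun c hc => hw c (by simp [hc])
    have hlast : (cw ++ [d]).getLast? = some d := List.getLast?_concat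
    simp only [List.cons_append, ctLoopA]
    rw [if_neg (by rintro ⟨_, _, h3, _⟩; rw [hlast] at h3; exact hd (by injection h3))]
    rw [if_neg (by rintro ⟨_, _, h3⟩; exact ha h3)]
    have := ih hw' (cw ++ [d]) a ha count (i + 1) rest
    simpa [List.append_assoc, Nat.add_comm, Nat.add_assoc, Nat.add_left_comm] using this

lemma ctRightA_nil : ctRightA [] = false := by decide

-- after A's first step at a word start, both loops agree through the word and at its end
lemma ctAB_tail (m : Nat)
    (IH : ∀ (l : List Char), l.length ≤ m →
      ∀ (cw : List Char) (i : Nat) (count : List Int) (n : Nat),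
      n = i + l.length → (cw = [] ∨ cw.getLast? = some ' ') →
      ctLoopA count cw i l = count ++ ctLoopB cw i l n)
    (c : Char) (hc : ¬ c = ' ') (rest : List Char) (hrm : rest.length ≤ m)
    (cw0 : List Char) (i : Nat) (count' : List Int) (n : Nat)
    (hn : n = i + 1 + rest.length) :
    ctLoopA count' (cw0 ++ [c]) (i + 1) rest =
      count' ++
        (if i + 1 + (rest.takeWhile (fun x => x ≠ ' ')).length < n ∧
            ctRightA (cw0 ++ c :: rest.takeWhile (fun x => x ≠ ' ')) = true then
          (((i + 1 + (rest.takeWhile (fun x => x ≠ ' ')).length : Nat) : Int) + 1) ::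
            ctLoopB [] (i + 1 + (rest.takeWhile (fun x => x ≠ ' ')).length)
              (rest.dropWhile (fun x => x ≠ ' ')) n
        else
          ctLoopB (cw0 ++ c :: rest.takeWhile (fun x => x ≠ ' '))
            (i + 1 + (rest.takeWhile (fun x => x ≠ ' ')).length)
            (rest.dropWhile (fun x => x ≠ ' ')) n) := by
  set w' := rest.takeWhile (fun x => x ≠ ' ') with hw'
  set rest' := rest.dropWhile (fun x => x ≠ ' ') with hrest'
  have hsplit : rest = w' ++ rest' := (List.takeWhile_append_dropWhile).symm
  have hwmem : ∀ x ∈ w', x ≠ ' ' := by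
    intro x hx; simpa using List.mem_takeWhile_imp hx
  set j : Nat := i + 1 + w'.length with hj
  have hA2 : ctLoopA count' (cw0 ++ [c]) (i + 1) rest = ctLoopA count' (cw0 ++ c :: w') j rest' := by
    conv_lhs => rw [hsplit]
    exact ctA_word w' hwmem cw0 c hc count' (i + 1) rest'
  rw [hA2]
  have hlast1 : ∃ e, (cw0 ++ c :: w').getLast? = some e ∧ e ≠ ' ' := by
    have h2 : (cw0 ++ c :: w').getLast? = (c :: w').getLast? :=
      List.getLast?_append_of_ne_nil _ (by simp)
    obtain ⟨e, he⟩ : ∃ e, (c :: w').getLast? = some e := by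
      cases h : (c :: w').getLast? with
      | none => exact absurd (List.getLast?_eq_none_iff.mp h) (by simp)
      | some e => exact ⟨e, rfl⟩
    refine ⟨e, by rw [h2, he], ?_⟩
    have hmem : e ∈ c :: w' := List.mem_of_getLast? he
    rcases List.mem_cons.mp hmem with h | h
    · subst h; exact hc
    · exact hwmem e h
  obtain ⟨e, helast, hene⟩ := hlast1
  match hre : rest' with
  | [] =>
    have hjn : j = n := by rw [hsplit] at hn; simp at hn; omega
    rw [if_neg (by rintro ⟨h1, _⟩; omega)]
    simp [ctLoopA, ctLoopB]
  | b :: rest2 =>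
    have hb' : b = ' ' := by
      have h := List.head?_dropWhile_not (fun x => x ≠ ' ') rest
      rw [← hrest'] at h
      simpa using h
    subst hb'
    have hjlt : j < n := by rw [hsplit] at hn; simp at hn; omega
    have hr2m : rest2.length ≤ m := by rw [hsplit] at hrm; simp at hrm; omega
    by_cases hr : ctRightA (cw0 ++ c :: w') = true
    · -- A's right-aligned rule fires at the space ending the word
      rw [if_pos ⟨hjlt, hr⟩]
      have hAstep : ctLoopA count' (cw0 ++ c :: w') j (' ' :: rest2) =
          ctLoopA (count' ++ [(j : Int) + 1]) [' '] (j + 1) rest2 := by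
        simp only [ctLoopA]
        rw [if_neg (by rintro ⟨_, _, _, h4, _⟩; exact h4 rfl)]
        rw [if_pos (show ctRightA (cw0 ++ c :: w') = true ∧ (cw0 ++ c :: w').getLast? ≠ some ' ' ∧ True from ⟨hr, (by rw [helast]; intro hcon; exact hene (by injection hcon)), trivial⟩)]
      rw [hAstep]
      have hih := IH rest2 hr2m [' '] (j + 1) (count' ++ [(j : Int) + 1]) n
        (by rw [hsplit] at hn; simp at hn; omega) (Or.inr rfl)
      rw [hih]
      have hB2 : ctLoopB [] j (' ' :: rest2) n = ctLoopB [' '] (j + 1) rest2 n := by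
        rw [ctLoopB]; simp
      rw [hB2]
      simp
    · -- right rule does not fire: the space joins the context
      rw [if_neg (by rintro ⟨_, h2⟩; exact hr h2)]
      have hAstep : ctLoopA count' (cw0 ++ c :: w') j (' ' :: rest2) =
          ctLoopA count' ((cw0 ++ c :: w') ++ [' ']) (j + 1) rest2 := by
        simp only [ctLoopA]
        rw [if_neg (by rintro ⟨_, _, _, h4, _⟩; exact h4 rfl)]
        rw [if_neg (by rintro ⟨h1, _, _⟩; exact hr h1)]
      rw [hAstep]
      have hih := IH rest2 hr2m ((cw0 ++ c :: w') ++ [' ']) (j + 1) count' n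
        (by rw [hsplit] at hn; simp at hn; omega) (Or.inr List.getLast?_concat)
      rw [hih]
      have hB2 : ctLoopB (cw0 ++ c :: w') j (' ' :: rest2) n =
          ctLoopB ((cw0 ++ c :: w') ++ [' ']) (j + 1) rest2 n := by
        rw [ctLoopB]; simp
      rw [hB2]

lemma ctAB (m : Nat) : ∀ (l : List Char), l.length ≤ m →
    ∀ (cw : List Char) (i : Nat) (count : List Int) (n : Nat),
    n = i + l.length → (cw = [] ∨ cw.getLast? = some ' ') →
    ctLoopA count cw i l = count ++ ctLoopB cw i l n := by
  induction m with
  | zero =>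
    intro l hl cw i count n hn _
    have : l = [] := List.length_eq_zero_iff.mp (Nat.le_zero.mp hl)
    subst this; simp [ctLoopA, ctLoopB]
  | succ m ih =>
    intro l hl cw i count n hn hb
    match l with
    | [] => simp [ctLoopA, ctLoopB]
    | c :: rest =>
      have hrm : rest.length ≤ m := by simpa using Nat.lt_succ_iff.mp (by simpa using hl)
      by_cases hc : c = ' '
      · -- space: neither branch of A fires; B accumulates the gap char
        subst hc
        have hA : ctLoopA count cw i (' ' :: rest) = ctLoopA count (cw ++ [' ']) (i + 1) rest := by
          simp only [ctLoopA]
          rw [if_neg (by rintro ⟨_, _, _, h4, _⟩; exact h4 rfl)]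
          rw [if_neg ?hneg]
          case hneg =>
            rintro ⟨h1, h2, _⟩
            rcases hb with h | h
            · subst h; rw [ctRightA_nil] at h1; exact Bool.false_ne_true h1
            · exact h2 h
        have hB : ctLoopB cw i (' ' :: rest) n = ctLoopB (cw ++ [' ']) (i + 1) rest n := by
          rw [ctLoopB]; simp
        rw [hA, hB]
        exact ih rest hrm (cw ++ [' ']) (i + 1) count n (by simp at hn ⊢; omega)
          (Or.inr List.getLast?_concat)
      · -- word start: A's left rule fires exactly when B's does (given hb and c ≠ ' ')
        have htw : (c :: rest).takeWhile (fun x => x ≠ ' ') = c :: rest.takeWhile (fun x => x ≠ ' ') := by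
          rw [List.takeWhile_cons_of_pos (by simpa using hc)]
        have hdw : (c :: rest).dropWhile (fun x => x ≠ ' ') = rest.dropWhile (fun x => x ≠ ' ') := by
          rw [List.dropWhile_cons_of_pos (by simpa using hc)]
        have hn' : n = i + 1 + rest.length := by simp at hn; omega
        have hjc : i + (c :: rest.takeWhile (fun x => x ≠ ' ')).length =
            i + 1 + (rest.takeWhile (fun x => x ≠ ' ')).length := by simp; omega
        by_cases hm' : (cw ≠ [] ∧ ctRightA cw = false ∧ cw.any PySem.Chars.isalpha = true)
        · -- left rule fires
          obtain ⟨h1, h2, h3⟩ := hm'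
          have hlastcw : cw.getLast? = some ' ' := by
            rcases hb with h | h
            · exact absurd h h1
            · exact h
          have hA1 : ctLoopA count cw i (c :: rest) =
              ctLoopA (count ++ [(i : Int) + 1]) ([] ++ [c]) (i + 1) rest := by
            simp only [ctLoopA]
            rw [if_pos ⟨h2, h1, hlastcw, hc, h3⟩]
            rfl
          have hB1 : ctLoopB cw i (c :: rest) n =
              [(i : Int) + 1] ++
                (if i + 1 + (rest.takeWhile (fun x => x ≠ ' ')).length < n ∧
                    ctRightA ([] ++ c :: rest.takeWhile (fun x => x ≠ ' ')) = true then
                  (((i + 1 + (rest.takeWhile (fun x => x ≠ ' ')).length : Nat) : Int) + 1) ::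
                    ctLoopB [] (i + 1 + (rest.takeWhile (fun x => x ≠ ' ')).length)
                      (rest.dropWhile (fun x => x ≠ ' ')) n
                else
                  ctLoopB ([] ++ c :: rest.takeWhile (fun x => x ≠ ' '))
                    (i + 1 + (rest.takeWhile (fun x => x ≠ ' ')).length)
                    (rest.dropWhile (fun x => x ≠ ' ')) n) := by
            rw [ctLoopB, dif_neg hc]
            simp only [htw, hdw, show ctRightB = ctRightA from rfl, hjc]
            have hmk : cw ≠ [] ∧ ctRightA cw = false ∧ cw.any PySem.Chars.isalpha = true := ⟨h1, h2, h3⟩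
            rw [if_pos hmk, if_pos hmk]
            split <;> rfl
          rw [hA1, hB1, ctAB_tail m ih c hc rest hrm [] i (count ++ [(i : Int) + 1]) n hn']
          simp
        · -- left rule does not fire
          have hA1 : ctLoopA count cw i (c :: rest) = ctLoopA count (cw ++ [c]) (i + 1) rest := by
            simp only [ctLoopA]
            rw [if_neg (by rintro ⟨hx1, hx2, _, _, hx5⟩; exact hm' ⟨hx2, hx1, hx5⟩)]
            rw [if_neg ?hneg2]
            case hneg2 =>
              rintro ⟨hx1, hx2, _⟩
              rcases hb with h | h
              · subst h; rw [ctRightA_nil] at hx1; exact Bool.false_ne_true hx1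
              · exact hx2 h
          have hB1 : ctLoopB cw i (c :: rest) n =
              ([] : List Int) ++
                (if i + 1 + (rest.takeWhile (fun x => x ≠ ' ')).length < n ∧
                    ctRightA (cw ++ c :: rest.takeWhile (fun x => x ≠ ' ')) = true then
                  (((i + 1 + (rest.takeWhile (fun x => x ≠ ' ')).length : Nat) : Int) + 1) ::
                    ctLoopB [] (i + 1 + (rest.takeWhile (fun x => x ≠ ' ')).length)
                      (rest.dropWhile (fun x => x ≠ ' ')) n
                else
                  ctLoopB (cw ++ c :: rest.takeWhile (fun x => x ≠ ' '))
                    (i + 1 + (rest.takeWhile (fun x => x ≠ ' ')).length)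
                    (rest.dropWhile (fun x => x ≠ ' ')) n) := by
            rw [ctLoopB, dif_neg hc]
            simp only [htw, hdw, show ctRightB = ctRightA from rfl, hjc]
            rw [if_neg hm', if_neg hm']
            split <;> rfl
          rw [hA1, hB1, ctAB_tail m ih c hc rest hrm cw i count n hn']
          simp

-- ===== VERDICT (by name: the statement is the Claim_ definition above) =====
theorem count_table_spec : Claim_equal_count_table := by
  intro header _
  unfold Spec_count_table count_table count_table_alt
  have := ctAB header.toList.length header.toList le_rfl [] 0 [] header.toList.length
    (by simp) (Or.inl rfl)
  simpa using this
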